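-- pv_equiv track=rewrite | github.com/gtklocker/adventofcode | 4/4.py | valid_two
-- ===== SOURCE A (Python) =====
-- def valid_two(num):
--     digit = None
--     group_digit = None
--     group_size = None
--     adjacent_rule_satisfied = False
--     while num > 0:
--         prev_digit = digit
--         digit = num % 10
--         num //= 10
--         if prev_digit is None: continue
--         if prev_digit == digit:
--             if group_digit == digit:
--                 group_size += 1
--             else:
--                 group_size = 2
--                 group_digit = digit
--         else:
--             if group_digit is not None and group_size == 2:
--                 adjacent_rule_satisfied = True
--         if prev_digit < digit:
--             return False
--     if group_digit is not None and group_size == 2: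
--         adjacent_rule_satisfied = True
--     return adjacent_rule_satisfied
-- ===== SOURCE B (Python) =====
-- def valid_two(num):
--     if num < 1:
--         return False
--     digits = list(str(num))
--     if sorted(digits) != digits:
--         return False
--     return 2 in (digits.count(d) for d in set(digits))
-- ===== Notes on version B (the rewrite author's own statement) =====
-- stated objective: idiomatic
-- what changed: Replaces the hand-rolled digit-peeling state machine (prev digit, open group digit/size, adjacency flag) with a string-based check: digits are non-decreasing iff sorted(digits) == digits, and since equal digits are then contiguous, a run of length exactly 2 exists iff some digit's total count is exactly 2.
import Mathlib
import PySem

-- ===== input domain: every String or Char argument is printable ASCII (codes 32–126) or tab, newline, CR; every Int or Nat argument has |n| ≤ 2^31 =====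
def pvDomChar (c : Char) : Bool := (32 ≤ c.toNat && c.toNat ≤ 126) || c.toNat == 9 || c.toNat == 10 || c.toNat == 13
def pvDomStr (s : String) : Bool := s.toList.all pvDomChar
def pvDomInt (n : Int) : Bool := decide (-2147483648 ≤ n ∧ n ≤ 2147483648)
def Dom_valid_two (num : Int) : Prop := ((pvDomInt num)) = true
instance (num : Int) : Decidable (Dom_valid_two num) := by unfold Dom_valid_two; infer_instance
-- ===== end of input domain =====

-- B replaces A's digit-peeling state machine by a string-based check
-- (sorted(digits) == digits, then some digit's count is exactly 2); same return value, no speed claim.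

-- ===== PORT A =====
-- A's `while num > 0` loop with its carried state (digit, group_digit, group_size, adjacent_rule_satisfied).
def validTwoLoop (num : Int) (digit group_digit group_size : Option Int) (adj : Bool) : Bool :=
  if _h : 0 < num then
    let prev := digit
    let d := PySem.Int.mod num 10
    match prev with
    | none => validTwoLoop (PySem.Int.floordiv num 10) (some d) group_digit group_size adj
    | some p =>
      let gd := if p = d then (if group_digit = some d then group_digit else some d) else group_digit
      let gs := if p = d then (if group_digit = some d then group_size.map (· + 1) else some 2) else group_size
      let adj' := if p ≠ d then (if group_digit ≠ none ∧ group_size = some 2 then true else adj) else adj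
      if p < d then false
      else validTwoLoop (PySem.Int.floordiv num 10) (some d) gd gs adj'
  else
    if group_digit ≠ none ∧ group_size = some 2 then true else adj
termination_by num.toNat
decreasing_by
  all_goals
    rw [PySem.Int.floordiv_eq_ediv_of_pos (by norm_num : (0:Int) < 10)]
    omega


def valid_two (num : Int) : Bool := validTwoLoop num none none none false

-- ===== PORT B =====
def valid_two_alt (num : Int) : Bool :=
  if num < 1 then false
  else
    let digits := PySem.Int.toChars num
    if PySem.List.sorted digits (fun c => c) false ≠ digits then false
    else ((PySem.Set.ofList digits).map (fun d => (PySem.List.count digits d : Int))).contains 2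

-- ===== PRECONDITION & SPEC =====
def Spec_valid_two (num : Int) (out : Bool) : Prop := out = valid_two_alt num
instance (num : Int) (out : Bool) : Decidable (Spec_valid_two num out) := by unfold Spec_valid_two; infer_instance

-- ===== CLAIM (what is proved, stated in full; the proofs are below) =====
def Claim_equal_valid_two : Prop := ∀ (num : Int), Dom_valid_two num → Spec_valid_two num (valid_two num)

-- ===== LEMMAS AND PROOFS =====

-- The digits of `num`, least significant first, exactly as A's loop peels them off.
def dIL (num : Int) : List Int :=
  if _h : 0 < num then PySem.Int.mod num 10 :: dIL (PySem.Int.floordiv num 10) else []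
termination_by num.toNat
decreasing_by
  rw [PySem.Int.floordiv_eq_ediv_of_pos (by norm_num : (0:Int) < 10)]
  omega


-- List form of A's loop (same branch structure, over the peeled-off digit list).
def loopA : List Int → Option Int → Option Int → Option Int → Bool → Bool
  | [], _, group_digit, group_size, adj =>
    if group_digit ≠ none ∧ group_size = some 2 then true else adj
  | d :: l, digit, group_digit, group_size, adj =>
    match digit with
    | none => loopA l (some d) group_digit group_size adj
    | some p =>
      let gd := if p = d then (if group_digit = some d then group_digit else some d) else group_digit
      let gs := if p = d then (if group_digit = some d then group_size.map (· + 1) else some 2) else group_size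
      let adj' := if p ≠ d then (if group_digit ≠ none ∧ group_size = some 2 then true else adj) else adj
      if p < d then false
      else loopA l (some d) gd gs adj'


theorem vl_aux : ∀ (k : Nat) (num : Int), num.toNat ≤ k → ∀ (digit gd gs : Option Int) (adj : Bool),
    validTwoLoop num digit gd gs adj = loopA (dIL num) digit gd gs adj := by
  intro k
  induction k with
  | zero =>
    intro num hk digit gd gs adj
    rw [validTwoLoop, dIL]
    have h : ¬ 0 < num := by omega
    simp [h, loopA]
  | succ k ih =>
    intro num hk digit gd gs adj
    rw [validTwoLoop, dIL]
    by_cases h : 0 < num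
    · have hrec : (PySem.Int.floordiv num 10).toNat ≤ k := by
        rw [PySem.Int.floordiv_eq_ediv_of_pos (by norm_num : (0:Int) < 10)]
        omega
      simp only [dif_pos h, loopA]
      cases digit with
      | none => exact ih _ hrec _ _ _ _
      | some p =>
        by_cases hp : p < PySem.Int.mod num 10
        · simp only [loopA, if_pos hp]
        · simp only [loopA, if_neg hp]
          exact ih _ hrec _ _ _ _
    · simp [h, loopA]


theorem loopA_false : ∀ (l : List Int) (d : Int) (gd gs : Option Int) (adj : Bool),
    ¬ List.IsChain (fun a b : Int => b ≤ a) (d :: l) →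
    loopA l (some d) gd gs adj = false := by
  intro l
  induction l with
  | nil => intro d gd gs adj h; exact absurd (by simp) h
  | cons e l ih =>
    intro d gd gs adj h
    rw [List.isChain_cons_cons] at h
    push_neg at h
    by_cases hed : e ≤ d
    · have := h hed
      simp only [loopA, if_neg (by omega : ¬ d < e)]
      exact ih e _ _ _ this
    · simp only [loopA, if_pos (by omega : d < e)]


theorem pw_le_head (x : Int) (l : List Int)
    (h : List.Pairwise (fun a b : Int => b ≤ a) (x :: l)) : ∀ f ∈ x :: l, f ≤ x := by
  intro f hf
  rcases List.mem_cons.mp hf with rfl | hf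
  · exact le_refl f
  · exact (List.pairwise_cons.mp h).1 f hf

-- Reference run scanner: remaining digits, current digit, current run length.
def goRef : List Int → Int → Int → Bool
  | [], _, s => s == 2
  | e :: l, d, s => if e = d then goRef l d (s + 1) else (s == 2) || goRef l e 1


theorem loopA_main : ∀ (l : List Int),
    (∀ (d s : Int) (adj : Bool), List.IsChain (fun a b : Int => b ≤ a) (d :: l) → 2 ≤ s →
      loopA l (some d) (some d) (some s) adj = (adj || goRef l d s)) ∧
    (∀ (d : Int) (gd gs : Option Int) (adj : Bool), List.IsChain (fun a b : Int => b ≤ a) (d :: l) →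
      (∀ e ∈ d :: l, gd ≠ some e) →
      ((gd ≠ none ∧ gs = some 2) → adj = true) →
      loopA l (some d) gd gs adj = (adj || goRef l d 1)) := by
  intro l
  induction l with
  | nil =>
    constructor
    · intro d s adj _ _
      by_cases hs : s = 2 <;> simp [loopA, goRef, hs]
    · intro d gd gs adj _ _ hadj
      simp only [goRef, loopA]
      split_ifs with hc
      · simp [hadj hc]
      · simp
  | cons e l ih =>
    obtain ⟨ihP, ihQ⟩ := ih
    constructor
    · -- open state (some d, some d, some s), s ≥ 2
      intro d s adj hch hs
      have hed : e ≤ d := (List.isChain_cons_cons.mp hch).1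
      have hch' : List.IsChain (fun a b : Int => b ≤ a) (e :: l) := (List.isChain_cons_cons.mp hch).2
      by_cases he : e = d
      · subst he
        simp only [loopA, goRef, if_pos rfl, if_neg (lt_irrefl e)]
        have := ihP e (s + 1) adj hch' (by omega)
        simpa using this
      · have hde : ¬ d = e := fun h => he h.symm
        have hdlt : ¬ d < e := by omega
        simp only [loopA, goRef, if_neg hde, if_pos hde, if_neg he, if_neg hdlt]
        -- state after: digit = some e, gd = some d, gs = some s, adj' = if cond then true else adj
        have hall : ∀ f ∈ e :: l, (some d : Option Int) ≠ some f := by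
          intro f hf hco
          have hfe : f ≤ e := pw_le_head e l (List.isChain_iff_pairwise.mp hch') f hf
          have : d = f := by injection hco
          omega
        have hadj' : ((some d : Option Int) ≠ none ∧ (some s : Option Int) = some 2) →
            (if (some d : Option Int) ≠ none ∧ (some s : Option Int) = some 2 then true else adj) = true := by
          intro hc; simp [hc]
        have := ihQ e (some d) (some s) (if (some d : Option Int) ≠ none ∧ (some s : Option Int) = some 2 then true else adj) hch' hall hadj'
        rw [this]
        by_cases hs2 : s = 2
        · simp [hs2]
        · have hb : (s == 2) = false := beq_eq_false_iff_ne.mpr hs2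
          simp [hs2, hb]
    · -- closed state, run length 1 at d
      intro d gd gs adj hch hgd hadj
      have hed : e ≤ d := (List.isChain_cons_cons.mp hch).1
      have hch' : List.IsChain (fun a b : Int => b ≤ a) (e :: l) := (List.isChain_cons_cons.mp hch).2
      by_cases he : e = d
      · subst he
        have hgde : gd ≠ some e := hgd e (by simp)
        simp only [loopA, goRef, if_pos rfl, if_neg hgde, if_neg (lt_irrefl e)]
        have := ihP e 2 adj hch' (by omega)
        simpa using this
      · have hde : ¬ d = e := fun h => he h.symm
        have hdlt : ¬ d < e := by omega
        simp only [loopA, goRef, if_neg hde, if_pos hde, if_neg he, if_neg hdlt]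
        have hall : ∀ f ∈ e :: l, gd ≠ some f := fun f hf => hgd f (List.mem_cons_of_mem d hf)
        have hadj' : ((gd ≠ none ∧ gs = some 2)) →
            (if gd ≠ none ∧ gs = some 2 then true else adj) = true := by
          intro hc; simp [hc]
        have heq := ihQ e gd gs (if gd ≠ none ∧ gs = some 2 then true else adj) hch' hall hadj'
        rw [heq]
        by_cases hc : gd ≠ none ∧ gs = some 2
        · simp [hc, hadj hc]
        · simp [hc]


theorem count_cons_ne (f g : Int) (L : List Int) (h : f ≠ g) :
    List.count f (g :: L) = List.count f L := by
  simp [List.count_cons]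
  omega


theorem goRef_count : ∀ (l : List Int) (d s : Int),
    List.IsChain (fun a b : Int => b ≤ a) (d :: l) →
    (goRef l d s = true ↔
      (s + (l.count d : Int) = 2 ∨ ∃ e ∈ l, e ≠ d ∧ (l.count e : Int) = 2)) := by
  intro l
  induction l with
  | nil =>
    intro d s _
    simp [goRef, beq_iff_eq]
  | cons e l ih =>
    intro d s hch
    have hed : e ≤ d := (List.isChain_cons_cons.mp hch).1
    have hch' : List.IsChain (fun a b : Int => b ≤ a) (e :: l) := (List.isChain_cons_cons.mp hch).2
    by_cases he : e = d
    · subst he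
      rw [goRef, if_pos rfl, ih e (s+1) hch']
      constructor
      · rintro (h1 | ⟨f, hf, hfd, hcf⟩)
        · left; rw [List.count_cons_self]; push_cast; omega
        · exact Or.inr ⟨f, List.mem_cons_of_mem e hf, hfd,
            by rw [count_cons_ne f e _ hfd]; exact hcf⟩
      · rintro (h1 | ⟨f, hf, hfd, hcf⟩)
        · left; rw [List.count_cons_self] at h1; push_cast at h1 ⊢; omega
        · rcases List.mem_cons.mp hf with rfl | hf'
          · exact absurd rfl hfd
          · exact Or.inr ⟨f, hf', hfd, by rw [count_cons_ne f e _ hfd] at hcf; exact hcf⟩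
    · have helt : e < d := lt_of_le_of_ne hed he
      have hnot : d ∉ e :: l := by
        intro hd
        have := pw_le_head e l (List.isChain_iff_pairwise.mp hch') d hd
        omega
      have hcd0 : (e :: l).count d = 0 := List.count_eq_zero.mpr hnot
      rw [goRef, if_neg he]
      rw [Bool.or_eq_true, ih e 1 hch']
      rw [hcd0]
      constructor
      · rintro (h1 | h2 | ⟨f, hf, hfe, hcf⟩)
        · left; have : s = 2 := by exact_mod_cast beq_iff_eq.mp h1
          omega
        · refine Or.inr ⟨e, by simp, fun h => he h, ?_⟩
          rw [List.count_cons_self]; push_cast at h2 ⊢; omega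
        · refine Or.inr ⟨f, List.mem_cons_of_mem e hf, ?_, ?_⟩
          · intro hfd; subst hfd; exact hnot (List.mem_cons_of_mem e hf)
          · rw [count_cons_ne f e _ hfe]; exact hcf
      · rintro (h1 | ⟨f, hf, hfd, hcf⟩)
        · left; simp only [beq_iff_eq]; omega
        · by_cases hfe : f = e
          · subst hfe
            rw [List.count_cons_self] at hcf
            right; left; push_cast at hcf ⊢; omega
          · rcases List.mem_cons.mp hf with rfl | hf'
            · exact absurd rfl hfe
            · right; right
              exact ⟨f, hf', hfe, by rw [count_cons_ne f e _ hfe] at hcf; exact hcf⟩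


theorem dIL_pos (n : Int) (h : 0 < n) :
    dIL n = PySem.Int.mod n 10 :: dIL (PySem.Int.floordiv n 10) := by
  rw [dIL]; simp [h]

theorem dIL_nonpos (n : Int) (h : ¬ 0 < n) : dIL n = [] := by
  rw [dIL]; simp [h]

theorem dIL_bounds : ∀ (k : Nat) (n : Int), n.toNat ≤ k → ∀ e ∈ dIL n, 0 ≤ e ∧ e < 10 := by
  intro k
  induction k with
  | zero =>
    intro n hk e he
    rw [dIL_nonpos n (by omega)] at he
    simp at he
  | succ k ih =>
    intro n hk e he
    by_cases h : 0 < n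
    · rw [dIL_pos n h] at he
      rcases List.mem_cons.mp he with rfl | he'
      · exact ⟨PySem.Int.mod_nonneg n (by norm_num), PySem.Int.mod_lt n (by norm_num)⟩
      · refine ih (PySem.Int.floordiv n 10) ?_ e he'
        rw [PySem.Int.floordiv_eq_ediv_of_pos (by norm_num : (0:Int) < 10)]
        omega
    · rw [dIL_nonpos n h] at he; simp at he

theorem toDigitsCore_eq : ∀ (fuel m : Nat) (acc : List Char), 0 < m → m < 10 ^ fuel →
    Nat.toDigitsCore 10 fuel m acc
      = ((dIL (m : Int)).map (fun k => Nat.digitChar k.toNat)).reverse ++ acc := by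
  intro fuel
  induction fuel with
  | zero => intro m acc h1 h2; simp at h2; omega
  | succ fuel ih =>
    intro m acc h1 h2
    have hdil : dIL (m : Int) = ((m % 10 : Nat) : Int) :: dIL ((m / 10 : Nat) : Int) := by
      rw [dIL_pos _ (by exact_mod_cast h1)]
      rw [show ((10:Int)) = ((10:Nat):Int) by norm_num]
      rw [PySem.Int.mod_natCast, PySem.Int.floordiv_natCast]
    rw [Nat.toDigitsCore]
    by_cases hz : m / 10 = 0
    · simp only [hz, if_pos rfl]
      rw [hdil, hz]
      rw [dIL_nonpos _ (by norm_num)]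
      simp
      congr 1
    · simp only [if_neg hz]
      rw [ih (m / 10) _ (Nat.pos_of_ne_zero hz) (by
        have : m < 10 ^ (fuel + 1) := h2
        rw [pow_succ] at this
        omega)]
      rw [hdil]
      simp
      congr 1

theorem digitChar_le_iff : ∀ a < 10, ∀ b < 10, (Nat.digitChar a ≤ Nat.digitChar b ↔ a ≤ b) := by decide

theorem digitChar_inj_iff : ∀ a < 10, ∀ b < 10, (Nat.digitChar a = Nat.digitChar b ↔ a = b) := by decide

theorem toChars_eq (n : Int) (h : 0 < n) :
    PySem.Int.toChars n = ((dIL n).map (fun k => Nat.digitChar k.toNat)).reverse := by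
  have hn : ¬ n < 0 := by omega
  rw [PySem.Int.toChars, if_neg hn, Nat.toDigits]
  rw [toDigitsCore_eq (n.toNat + 1) n.toNat [] (by omega)
    (by
      calc n.toNat < 10 ^ n.toNat := Nat.lt_pow_self (by norm_num)
        _ ≤ 10 ^ (n.toNat + 1) := Nat.pow_le_pow_right (by norm_num) (by omega))]
  rw [show ((n.toNat : Int)) = n by omega]
  simp

theorem count_digits (L : List Int) (hb : ∀ e ∈ L, 0 ≤ e ∧ e < 10) (k : Int) (hk0 : 0 ≤ k) (hk10 : k < 10) :
    List.count (Nat.digitChar k.toNat) ((L.map (fun j => Nat.digitChar j.toNat)).reverse) = L.count k := by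
  rw [List.count_reverse, List.count_eq_countP, List.countP_map,
    List.count_eq_countP]
  apply List.countP_congr
  intro x hx
  obtain ⟨hx0, hx10⟩ := hb x hx
  simp only [Function.comp_apply, beq_iff_eq]
  rw [digitChar_inj_iff x.toNat (by omega) k.toNat (by omega)]
  omega

theorem pairwise_digits_iff (L : List Int) (hb : ∀ e ∈ L, 0 ≤ e ∧ e < 10) :
    List.Pairwise (fun a b : Char => a ≤ b) ((L.map (fun k => Nat.digitChar k.toNat)).reverse)
      ↔ List.Pairwise (fun a b : Int => b ≤ a) L := by
  rw [List.pairwise_reverse, List.pairwise_map]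
  constructor
  · intro hp
    refine hp.imp_of_mem ?_
    intro a b ha hb'
    obtain ⟨ha0, ha10⟩ := hb a ha
    obtain ⟨hb0, hb10⟩ := hb b hb'
    intro hle
    have := (digitChar_le_iff b.toNat (by omega) a.toNat (by omega)).mp hle
    omega
  · intro hp
    refine hp.imp_of_mem ?_
    intro a b ha hb'
    obtain ⟨ha0, ha10⟩ := hb a ha
    obtain ⟨hb0, hb10⟩ := hb b hb'
    intro hle
    exact (digitChar_le_iff b.toNat (by omega) a.toNat (by omega)).mpr (by omega)

theorem cons_count_iff (d : Int) (t : List Int) :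
    ((1 : Int) + (t.count d : Int) = 2 ∨ ∃ e ∈ t, e ≠ d ∧ (t.count e : Int) = 2) ↔
      ∃ k ∈ d :: t, (((d :: t).count k : Nat) : Int) = 2 := by
  constructor
  · rintro (h1 | ⟨e, he, hed, hce⟩)
    · exact ⟨d, List.mem_cons_self, by rw [List.count_cons_self]; push_cast; omega⟩
    · exact ⟨e, List.mem_cons_of_mem d he, by rw [count_cons_ne e d t hed]; exact hce⟩
  · rintro ⟨k, hk, hck⟩
    by_cases hkd : k = d
    · subst hkd
      rw [List.count_cons_self] at hck
      left; push_cast at hck ⊢; omega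
    · rcases List.mem_cons.mp hk with rfl | hk'
      · exact absurd rfl hkd
      · rw [count_cons_ne k d t hkd] at hck
        exact Or.inr ⟨k, hk', hkd, hck⟩

theorem valid_two_eq (num : Int) : valid_two num = valid_two_alt num := by
  rw [valid_two, vl_aux num.toNat num le_rfl]
  by_cases h : 0 < num
  · have hlt : ¬ num < 1 := by omega
    have hbnd := dIL_bounds num.toNat num le_rfl
    have hcons := dIL_pos num h
    set d := PySem.Int.mod num 10 with hd
    set t := dIL (PySem.Int.floordiv num 10) with ht
    have hchars : PySem.Int.toChars num = ((dIL num).map (fun k => Nat.digitChar k.toNat)).reverse :=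
      toChars_eq num h
    rw [valid_two_alt, if_neg hlt]
    by_cases hch : List.IsChain (fun a b : Int => b ≤ a) (dIL num)
    · -- non-decreasing digits
      have hpw : List.Pairwise (fun a b : Char => a ≤ b)
          (((dIL num).map (fun k => Nat.digitChar k.toNat)).reverse) :=
        (pairwise_digits_iff _ hbnd).mpr (List.isChain_iff_pairwise.mp hch)
      have hsorted : PySem.List.sorted (PySem.Int.toChars num) (fun c => c) = PySem.Int.toChars num := by
        rw [hchars]
        exact PySem.List.sorted_eq_self_of_pairwise _ _ hpw
      rw [if_neg (by simp [hsorted])]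
      -- A side: unfold one loop step
      rw [hcons, loopA]
      have hch' : List.IsChain (fun a b : Int => b ≤ a) (d :: t) := by rwa [hcons] at hch
      rw [(loopA_main t).2 d none none false hch' (by simp) (by simp)]
      rw [Bool.eq_iff_iff, Bool.false_or, goRef_count t d 1 hch']
      rw [List.contains_iff_exists_mem_beq]
      constructor
      · intro hP
        obtain ⟨k, hk, hck⟩ := (cons_count_iff d t).mp hP
        rw [← hcons] at hk hck
        obtain ⟨hk0, hk10⟩ := hbnd k hk
        have hmem : Nat.digitChar k.toNat ∈ PySem.Int.toChars num := by
          rw [hchars, List.mem_reverse]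
          exact List.mem_map.mpr ⟨k, hk, rfl⟩
        refine ⟨((PySem.List.count (PySem.Int.toChars num) (Nat.digitChar k.toNat) : Nat) : Int),
          List.mem_map.mpr ⟨Nat.digitChar k.toNat, (PySem.Set.mem_ofList _ _).mpr hmem, rfl⟩, ?_⟩
        have hcd : List.count (Nat.digitChar k.toNat) (PySem.Int.toChars num) = (dIL num).count k := by
          rw [hchars]; exact count_digits (dIL num) hbnd k hk0 hk10
        simp only [PySem.List.count, hcd, beq_iff_eq]
        omega
      · rintro ⟨v, hv, h2v⟩
        obtain ⟨c, hc, rfl⟩ := List.mem_map.mp hv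
        have hc' : c ∈ PySem.Int.toChars num := (PySem.Set.mem_ofList _ _).mp hc
        rw [hchars, List.mem_reverse] at hc'
        obtain ⟨k, hk, rfl⟩ := List.mem_map.mp hc'
        obtain ⟨hk0, hk10⟩ := hbnd k hk
        have hcd : List.count (Nat.digitChar k.toNat) (PySem.Int.toChars num) = (dIL num).count k := by
          rw [hchars]; exact count_digits (dIL num) hbnd k hk0 hk10
        simp only [PySem.List.count, hcd, beq_iff_eq] at h2v
        apply (cons_count_iff d t).mpr
        rw [← hcons]
        exact ⟨k, hk, by omega⟩
    · -- digits not non-decreasing: both sides false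
      rw [hcons, loopA]
      have hnc : ¬ List.IsChain (fun a b : Int => b ≤ a) (d :: t) := by rwa [hcons] at hch
      rw [loopA_false t d none none false hnc]
      have hne : PySem.List.sorted (PySem.Int.toChars num) (fun c => c) ≠ PySem.Int.toChars num := by
        intro heq
        apply hch
        apply List.isChain_iff_pairwise.mpr
        apply (pairwise_digits_iff _ hbnd).mp
        rw [← hchars, ← heq]
        exact PySem.List.sorted_pairwise _ _
      rw [if_pos hne]
  · have hlt : num < 1 := by omega
    rw [dIL_nonpos num h, valid_two_alt, if_pos hlt]
    simp [loopA]


-- ===== VERDICT (by name: the statement is the Claim_ definition above) =====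
theorem valid_two_spec : Claim_equal_valid_two := by
  intro num _
  show valid_two num = valid_two_alt num
  exact valid_two_eq num
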